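-- pv_equiv track=rewrite | github.com/gistjackdaniel/infinigen_llm_module | infinigen_examples/nlp/tag_mapping.py | stage_types_to_stage_flags
-- ===== SOURCE A (Python) =====
-- def stage_types_to_stage_flags(
--     stage_types: dict[str, bool],
--     exclusive: bool = False,
-- ) -> dict[str, bool]:
--     """Convert detailed stage types to high-level stage enable/disable flags.
--
--     This function maps the 7 detailed stage types to the 3 main stages:
--     - solve_large: on_floor_and_wall, on_floor_freestanding
--     - solve_medium: on_wall, on_ceiling, side_obj
--     - solve_small: obj_ontop_obj, obj_on_support
--
--     The behavior depends on the exclusive flag: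
--     - exclusive=False (default): stage_types is purely descriptive.
--       All stages remain True regardless of stage_types content.
--       This is the case for descriptions like "책상 위에 마우스가 있게 해줘".
--     - exclusive=True: stage_types is restrictive ("only/만" semantics).
--       Only stages with at least one sub-type set to True are enabled;
--       stages with no sub-types mentioned or all False are disabled.
--       This is the case for descriptions like "바닥에만 배치해줘".
--
--     Args:
--         stage_types: Dictionary with stage type flags (e.g., {"on_floor_and_wall": True, ...})
--         exclusive: If True, only enable stages that have at least one sub-type True.
--                    If False, all stages remain True (stage_types is informational only).
--
--     Returns:
--         Dictionary with solve_*_enabled flags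
--     """
--     # Default: all stages enabled
--     default_flags = {
--         "solve_large_enabled": True,
--         "solve_medium_enabled": True,
--         "solve_small_enabled": True,
--     }
--
--     if not stage_types:
--         return default_flags
--
--     # If not exclusive, stage_types is descriptive only — don't restrict anything
--     if not exclusive:
--         return default_flags
--
--     # Exclusive mode: only enable stages that have at least one sub-type explicitly True
--     large_types = ["on_floor_and_wall", "on_floor_freestanding"]
--     medium_types = ["on_wall", "on_ceiling", "side_obj"]
--     small_types = ["obj_ontop_obj", "obj_on_support"]
--
--     def _any_explicitly_true(sub_types: list[str]) -> bool:
--         """Return True if any sub-type is explicitly set to True."""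
--         return any(stage_types.get(st) is True for st in sub_types)
--
--     solve_large = _any_explicitly_true(large_types)
--     solve_medium = _any_explicitly_true(medium_types)
--     solve_small = _any_explicitly_true(small_types)
--
--     # Enforce stage dependencies:
--     # - solve_small requires solve_large (objects on top need base objects on floor first)
--     # - side_obj (in medium) requires solve_large (objects beside need base objects first)
--     if solve_small:
--         solve_large = True
--     if stage_types.get("side_obj") is True:
--         solve_large = True
--
--     return {
--         "solve_large_enabled": solve_large,
--         "solve_medium_enabled": solve_medium,
--         "solve_small_enabled": solve_small,
--     }
-- ===== SOURCE B (Python) =====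
-- _GROUP_OF = {
--     "on_floor_and_wall": "large",
--     "on_floor_freestanding": "large",
--     "on_wall": "medium",
--     "on_ceiling": "medium",
--     "side_obj": "medium",
--     "obj_ontop_obj": "small",
--     "obj_on_support": "small",
-- }
--
--
-- def stage_types_to_stage_flags(
--     stage_types: dict[str, bool],
--     exclusive: bool = False,
-- ) -> dict[str, bool]:
--     """Reverse-index re-implementation: one pass over stage_types.items()."""
--     if not stage_types or not exclusive:
--         return {
--             "solve_large_enabled": True,
--             "solve_medium_enabled": True,
--             "solve_small_enabled": True,
--         }
--
--     solve_large = solve_medium = solve_small = False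
--     for key, value in stage_types.items():
--         if value is True:
--             group = _GROUP_OF.get(key)
--             if group == "large":
--                 solve_large = True
--             elif group == "medium":
--                 solve_medium = True
--                 if key == "side_obj":
--                     solve_large = True  # side objects need a large base
--             elif group == "small":
--                 solve_small = True
--
--     if solve_small:
--         solve_large = True
--
--     return {
--         "solve_large_enabled": solve_large,
--         "solve_medium_enabled": solve_medium,
--         "solve_small_enabled": solve_small,
--     }
-- ===== Notes on version B (the rewrite author's own statement) =====
-- stated objective: idiomatic
-- what changed: Replaces the three per-group scans (any(stage_types.get(st) is True) over fixed sub-type lists, plus a separate side_obj lookup) by a prebuilt reverse index from sub-type to group and a single pass over stage_types.items() that sets the three flags, handling the side_obj dependency inside the pass.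
import Mathlib
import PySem

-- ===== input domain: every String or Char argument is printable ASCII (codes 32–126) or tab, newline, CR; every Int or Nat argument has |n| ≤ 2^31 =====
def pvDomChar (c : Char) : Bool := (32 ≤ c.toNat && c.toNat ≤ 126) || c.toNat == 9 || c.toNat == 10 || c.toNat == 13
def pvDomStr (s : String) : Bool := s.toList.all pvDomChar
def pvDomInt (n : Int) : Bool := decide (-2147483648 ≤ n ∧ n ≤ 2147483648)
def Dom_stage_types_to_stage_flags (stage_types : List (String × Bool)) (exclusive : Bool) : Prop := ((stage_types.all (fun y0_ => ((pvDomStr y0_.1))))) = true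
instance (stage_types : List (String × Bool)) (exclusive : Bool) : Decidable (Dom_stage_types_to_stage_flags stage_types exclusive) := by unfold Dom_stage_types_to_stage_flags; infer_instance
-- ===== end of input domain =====

-- B replaces the three fixed-list scans of A by a prebuilt sub-type→group reverse index and one pass over the items (idiomatic; same cost).


-- ===== PORT A =====
def pvDefaultFlags : List (String × Bool) :=
  [("solve_large_enabled", true), ("solve_medium_enabled", true), ("solve_small_enabled", true)]

-- _any_explicitly_true: any(stage_types.get(st) is True for st in sub_types)
def pvAnyExplicitlyTrue (d : PySem.Dict String Bool) (subTypes : List String) : Bool :=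
  subTypes.any (fun st => d.get? st == some true)

def stage_types_to_stage_flags (stage_types : List (String × Bool)) (exclusive : Bool) : List (String × Bool) :=
  if stage_types.isEmpty then pvDefaultFlags
  else if !exclusive then pvDefaultFlags
  else
    let d : PySem.Dict String Bool := PySem.Dict.mk stage_types
    let largeTypes := ["on_floor_and_wall", "on_floor_freestanding"]
    let mediumTypes := ["on_wall", "on_ceiling", "side_obj"]
    let smallTypes := ["obj_ontop_obj", "obj_on_support"]
    let solveLarge := pvAnyExplicitlyTrue d largeTypes
    let solveMedium := pvAnyExplicitlyTrue d mediumTypes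
    let solveSmall := pvAnyExplicitlyTrue d smallTypes
    let solveLarge := if solveSmall then true else solveLarge
    let solveLarge := if d.get? "side_obj" == some true then true else solveLarge
    [("solve_large_enabled", solveLarge), ("solve_medium_enabled", solveMedium),
     ("solve_small_enabled", solveSmall)]

-- ===== PORT B =====
def pvGroupOf : PySem.Dict String String :=
  PySem.Dict.mk
    [("on_floor_and_wall", "large"), ("on_floor_freestanding", "large"),
     ("on_wall", "medium"), ("on_ceiling", "medium"), ("side_obj", "medium"),
     ("obj_ontop_obj", "small"), ("obj_on_support", "small")]

-- one step of the pass over stage_types.items(); state = (solve_large, solve_medium, solve_small)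
def pvStep (s : Bool × Bool × Bool) (kv : String × Bool) : Bool × Bool × Bool :=
  if kv.2 then
    let group := pvGroupOf.get? kv.1
    if group == some "large" then (true, s.2.1, s.2.2)
    else if group == some "medium" then
      ((if kv.1 == "side_obj" then true else s.1), true, s.2.2)
    else if group == some "small" then (s.1, s.2.1, true)
    else s
  else s

def stage_types_to_stage_flags_alt (stage_types : List (String × Bool)) (exclusive : Bool) : List (String × Bool) :=
  if stage_types.isEmpty || !exclusive then
    [("solve_large_enabled", true), ("solve_medium_enabled", true), ("solve_small_enabled", true)]
  else
    let st := stage_types.foldl pvStep (false, false, false)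
    let solveLarge := if st.2.2 then true else st.1
    [("solve_large_enabled", solveLarge), ("solve_medium_enabled", st.2.1),
     ("solve_small_enabled", st.2.2)]

-- ===== PRECONDITION & SPEC =====
-- Pre_ excludes association lists with duplicate keys: they do not represent a Python dict
-- (the dict collapses them before either function runs), and on them A's first-match
-- lookups and B's pass over all items read different values.
def Pre_stage_types_to_stage_flags (stage_types : List (String × Bool)) (exclusive : Bool) : Prop :=
  (stage_types.map Prod.fst).Nodup

instance (stage_types : List (String × Bool)) (exclusive : Bool) : Decidable (Pre_stage_types_to_stage_flags stage_types exclusive) := by unfold Pre_stage_types_to_stage_flags; infer_instance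

def pvWitness_stage_types_to_stage_flags : (List (String × Bool)) × Bool :=
  ([("on_wall", true), ("side_obj", false)], true)

def Spec_stage_types_to_stage_flags (stage_types : List (String × Bool)) (exclusive : Bool) (out : List (String × Bool)) : Prop := out = stage_types_to_stage_flags_alt stage_types exclusive
instance (stage_types : List (String × Bool)) (exclusive : Bool) (out : List (String × Bool)) : Decidable (Spec_stage_types_to_stage_flags stage_types exclusive out) := by unfold Spec_stage_types_to_stage_flags; infer_instance

-- ===== CLAIM (what is proved, stated in full; the proofs are below) =====
def Claim_equal_stage_types_to_stage_flags : Prop := ∀ (stage_types : List (String × Bool)) (exclusive : Bool), Dom_stage_types_to_stage_flags stage_types exclusive → Pre_stage_types_to_stage_flags stage_types exclusive → Spec_stage_types_to_stage_flags stage_types exclusive (stage_types_to_stage_flags stage_types exclusive)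

-- ===== LEMMAS AND PROOFS =====

theorem any_or_split (xs : List (String × Bool)) (p q : String × Bool → Bool) :
    (xs.any fun x => p x || q x) = (xs.any p || xs.any q) := by
  induction xs with
  | nil => rfl
  | cons x t ih => cases hp : p x <;> simp [hp, ih, Bool.or_assoc, Bool.or_left_comm]

theorem fold_pvStep (st : List (String × Bool)) (l m s : Bool) :
    st.foldl pvStep (l, m, s) =
      (l || st.any (fun kv => kv.2 && (kv.1 == "on_floor_and_wall" || kv.1 == "on_floor_freestanding" || kv.1 == "side_obj")),
       m || st.any (fun kv => kv.2 && (kv.1 == "on_wall" || kv.1 == "on_ceiling" || kv.1 == "side_obj")),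
       s || st.any (fun kv => kv.2 && (kv.1 == "obj_ontop_obj" || kv.1 == "obj_on_support"))) := by
  induction st generalizing l m s with
  | nil => simp
  | cons kv rest ih =>
    obtain ⟨k, v⟩ := kv
    simp only [List.foldl_cons, List.any_cons, pvStep]
    cases v with
    | false => simp [ih]
    | true =>
      by_cases h1 : k = "on_floor_and_wall"
      · subst h1; simp [pvGroupOf, PySem.Dict.get?, ih]
      · by_cases h2 : k = "on_floor_freestanding"
        · subst h2; simp [pvGroupOf, PySem.Dict.get?, ih]
        · by_cases h3 : k = "on_wall"
          · subst h3; simp [pvGroupOf, PySem.Dict.get?, ih]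
          · by_cases h4 : k = "on_ceiling"
            · subst h4; simp [pvGroupOf, PySem.Dict.get?, ih]
            · by_cases h5 : k = "side_obj"
              · subst h5; simp [pvGroupOf, PySem.Dict.get?, ih]
              · by_cases h6 : k = "obj_ontop_obj"
                · subst h6; simp [pvGroupOf, PySem.Dict.get?, ih]
                · by_cases h7 : k = "obj_on_support"
                  · subst h7; simp [pvGroupOf, PySem.Dict.get?, ih]
                  · have e1 : ("on_floor_and_wall" == k) = false := by simp [Ne.symm h1]
                    have e2 : ("on_floor_freestanding" == k) = false := by simp [Ne.symm h2]
                    have e3 : ("on_wall" == k) = false := by simp [Ne.symm h3]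
                    have e4 : ("on_ceiling" == k) = false := by simp [Ne.symm h4]
                    have e5 : ("side_obj" == k) = false := by simp [Ne.symm h5]
                    have e6 : ("obj_ontop_obj" == k) = false := by simp [Ne.symm h6]
                    have e7 : ("obj_on_support" == k) = false := by simp [Ne.symm h7]
                    simp only [pvGroupOf, PySem.Dict.get?, List.find?, e1, e2, e3, e4, e5, e6, e7,
                      Option.map_none, Option.map_some, ih]
                    have f1 : (k == "on_floor_and_wall") = false := by simp [h1]
                    have f2 : (k == "on_floor_freestanding") = false := by simp [h2]
                    have f3 : (k == "on_wall") = false := by simp [h3]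
                    have f4 : (k == "on_ceiling") = false := by simp [h4]
                    have f5 : (k == "side_obj") = false := by simp [h5]
                    have f6 : (k == "obj_ontop_obj") = false := by simp [h6]
                    have f7 : (k == "obj_on_support") = false := by simp [h7]
                    simp [f1, f2, f3, f4, f5, f6, f7]

-- under Nodup keys, "first match is true" = "the pair (k, true) occurs"
theorem get?_true_iff (st : List (String × Bool)) (hnd : (st.map Prod.fst).Nodup) (k : String) :
    ((PySem.Dict.mk st).get? k == some true) = st.any (fun kv => kv.2 && (kv.1 == k)) := by
  induction st with
  | nil => simp [PySem.Dict.get?]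
  | cons p rest ih =>
    obtain ⟨k', v⟩ := p
    simp only [List.map_cons, List.nodup_cons] at hnd
    rw [PySem.Dict.get?_mk_cons]
    by_cases hk : k' = k
    · subst hk
      have : rest.any (fun kv => kv.2 && (kv.1 == k')) = false := by
        simp only [List.any_eq_false]
        rintro ⟨a, b⟩ hab
        have : a ≠ k' := fun h => hnd.1 (h ▸ List.mem_map_of_mem hab)
        simp [this]
      cases v <;> simp [this]
    · have hk' : (k' == k) = false := by simp [hk]
      simp [hk', ih hnd.2]

-- ===== VERDICT (by name: the statement is the Claim_ definition above) =====
theorem stage_types_to_stage_flags_spec : Claim_equal_stage_types_to_stage_flags := by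
  intro st ex _ hpre
  unfold Spec_stage_types_to_stage_flags
  unfold stage_types_to_stage_flags stage_types_to_stage_flags_alt
  by_cases he : st.isEmpty
  · simp [he, pvDefaultFlags]
  · cases ex with
    | false => simp [he, pvDefaultFlags]
    | true =>
      simp only [he, Bool.not_true, if_false, Bool.false_or, if_true, Bool.or_false]
      rw [fold_pvStep]
      simp only [Bool.and_or_distrib_left, any_or_split, pvAnyExplicitlyTrue,
        List.any_cons, List.any_nil, Bool.or_false, get?_true_iff st hpre]
      generalize (st.any fun kv => kv.2 && (kv.1 == "on_floor_and_wall")) = a1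
      generalize (st.any fun kv => kv.2 && (kv.1 == "on_floor_freestanding")) = a2
      generalize (st.any fun kv => kv.2 && (kv.1 == "on_wall")) = a3
      generalize (st.any fun kv => kv.2 && (kv.1 == "on_ceiling")) = a4
      generalize (st.any fun kv => kv.2 && (kv.1 == "side_obj")) = a5
      generalize (st.any fun kv => kv.2 && (kv.1 == "obj_ontop_obj")) = a6
      generalize (st.any fun kv => kv.2 && (kv.1 == "obj_on_support")) = a7
      cases a1 <;> cases a2 <;> cases a3 <;> cases a4 <;> cases a5 <;> cases a6 <;> cases a7 <;> rfl
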